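-- pv_equiv track=rewrite | github.com/Hungbui911/python_lesson | Phan_tich_thanh_2_so_nguyen_to.py | phan_tich
-- ===== SOURCE A (Python) =====
-- def kt_snt(n):
--     if n < 2:
--         return False
--     for i in range(2, int(n ** 0.5) + 1):
--         if n % i == 0:
--             return False
--     return True
--
-- def phan_tich(n):
--     cap_so_TM = None
--     khoang_cach_max = 0
--
--     for i in range(2, n // 2 + 1):
--         j = n - i
--         if kt_snt(i) and kt_snt(j):
--             khoang_cach_2_so = abs(j - i)
--             if khoang_cach_2_so > khoang_cach_max:
--                 cap_so_TM = (i, j)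
--                 khoang_cach_max = khoang_cach_2_so
--
--     return cap_so_TM
-- ===== SOURCE B (Python) =====
-- def phan_tich(n):
--     if n < 4:
--         return None
--     # Sieve of Eratosthenes up to n instead of per-candidate trial division.
--     sieve = bytearray([1]) * (n + 1)
--     sieve[0] = sieve[1] = 0
--     i = 2
--     while i * i <= n:
--         if sieve[i]:
--             m = i * i
--             while m <= n:
--                 sieve[m] = 0
--                 m += i
--         i += 1
--     cap_so_TM = None
--     khoang_cach_max = 0
--     for i in range(2, n // 2 + 1):
--         j = n - i
--         if sieve[i] and sieve[j]:
--             khoang_cach = j - i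
--             if khoang_cach > khoang_cach_max:
--                 cap_so_TM = (i, j)
--                 khoang_cach_max = khoang_cach
--     return cap_so_TM
-- ===== Notes on version B (the rewrite author's own statement) =====
-- stated objective: faster
-- what changed: B replaces the per-candidate trial-division primality test with one Sieve of Eratosthenes table built up to n, so each candidate pair is checked by two O(1) table lookups.
import Mathlib
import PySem

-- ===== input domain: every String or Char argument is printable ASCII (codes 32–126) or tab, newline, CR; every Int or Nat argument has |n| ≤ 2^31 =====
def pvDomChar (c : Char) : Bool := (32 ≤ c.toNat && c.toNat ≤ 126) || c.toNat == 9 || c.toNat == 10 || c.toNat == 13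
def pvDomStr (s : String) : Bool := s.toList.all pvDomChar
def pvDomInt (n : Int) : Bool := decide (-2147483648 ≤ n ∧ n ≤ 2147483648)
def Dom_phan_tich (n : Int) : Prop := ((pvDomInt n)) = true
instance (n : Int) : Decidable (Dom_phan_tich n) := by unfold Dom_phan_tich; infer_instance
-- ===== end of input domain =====

-- B replaces A's per-candidate trial-division primality test by a single Sieve of
-- Eratosthenes table up to n (asymptotically faster); the pair-search loop and its
-- strict max-distance update are unchanged.


-- ===== PORT A =====
-- the for-loop of kt_snt with its early 'return False'
def kt_snt_go (n : Int) : List Int → Bool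
  | [] => true
  | i :: rest => if PySem.Int.mod n i == 0 then false else kt_snt_go n rest

-- 'int(n ** 0.5)' is ported as Nat.sqrt: exact for 0 ≤ n ≤ 2^31 (CPython-checked on Dom)
def kt_snt (n : Int) : Bool :=
  if n < 2 then false
  else kt_snt_go n (PySem.List.pyRange 2 ((n.toNat.sqrt : Int) + 1) 1)

def phan_tich (n : Int) : Option (Int × Int) :=
  ((PySem.List.pyRange 2 (PySem.Int.floordiv n 2 + 1) 1).foldl
    (fun (st : Option (Int × Int) × Int) i =>
      let j := n - i
      if kt_snt i && kt_snt j then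
        if |j - i| > st.2 then (some (i, j), |j - i|) else st
      else st) (none, 0)).1

-- ===== PORT B =====
-- inner while loop: mark m, m+i, m+2i, … ≤ N as composite (hi only justifies termination)
def markMult (N i : Nat) (hi : 2 ≤ i) (m : Nat) (s : List Bool) : List Bool :=
  if m ≤ N then markMult N i hi (m + i) (s.set m false) else s
  termination_by N + 1 - m
  decreasing_by omega

-- outer while loop: i = 2, 3, … while i*i ≤ N
def sieveLoop (N i : Nat) (hi : 2 ≤ i) (s : List Bool) : List Bool :=
  if h : i * i ≤ N then
    sieveLoop N (i + 1) (by omega)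
      (if s.getD i false then markMult N i hi (i * i) s else s)
  else s
  termination_by N + 1 - i
  decreasing_by have : i ≤ i * i := Nat.le_mul_of_pos_left i (by omega); omega

def phan_tich_alt (n : Int) : Option (Int × Int) :=
  if n < 4 then none
  else
    let N := n.toNat
    let s := sieveLoop N 2 (by omega) (((List.replicate (N + 1) true).set 0 false).set 1 false)
    ((PySem.List.pyRange 2 (PySem.Int.floordiv n 2 + 1) 1).foldl
      (fun (st : Option (Int × Int) × Int) i =>
        let j := n - i
        if s.getD i.toNat false && s.getD j.toNat false then
          if j - i > st.2 then (some (i, j), j - i) else st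
        else st) (none, 0)).1

-- ===== PRECONDITION & SPEC =====
def Spec_phan_tich (n : Int) (out : Option (Int × Int)) : Prop := out = phan_tich_alt n
instance (n : Int) (out : Option (Int × Int)) : Decidable (Spec_phan_tich n out) := by unfold Spec_phan_tich; infer_instance

-- ===== CLAIM (what is proved, stated in full; the proofs are below) =====
def Claim_equal_phan_tich : Prop := ∀ (n : Int), Dom_phan_tich n → Spec_phan_tich n (phan_tich n)

-- ===== LEMMAS AND PROOFS =====

-- after the sieve has processed all bases < p, cell k is marked (false) iff:
def Marked (p k : Nat) : Prop := k < 2 ∨ ∃ d, 2 ≤ d ∧ d < p ∧ d * d ≤ k ∧ d ∣ k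

-- "k has no divisor d with 2 ≤ d, d² ≤ k": the shared primality criterion
def NoSmallDiv (k : Nat) : Prop := ∀ d, 2 ≤ d → d * d ≤ k → ¬ d ∣ k

lemma kt_snt_go_iff (n : Int) (L : List Int) :
    kt_snt_go n L = true ↔ ∀ i ∈ L, ¬ PySem.Int.mod n i = 0 := by
  induction L with
  | nil => simp [kt_snt_go]
  | cons a L ih =>
    simp only [kt_snt_go, List.mem_cons]
    by_cases h : PySem.Int.mod n a = 0 <;> simp [h, ih]

lemma kt_snt_iff (k : Nat) (hk : 2 ≤ k) :
    kt_snt (k : Int) = true ↔ NoSmallDiv k := by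
  unfold kt_snt
  rw [if_neg (by omega), kt_snt_go_iff]
  simp only [Int.toNat_natCast]
  constructor
  · intro H d hd2 hdd hdvd
    have hds : d ≤ k.sqrt := Nat.le_sqrt.mpr hdd
    have hmem : (d : Int) ∈ PySem.List.pyRange 2 (↑k.sqrt + 1) 1 := by
      rw [PySem.List.mem_pyRange_one]
      exact ⟨by exact_mod_cast hd2, by exact_mod_cast (by omega : (d : Int) < ↑k.sqrt + 1)⟩
    exact H _ hmem (by rw [PySem.Int.mod_eq_zero_iff_dvd]; exact_mod_cast hdvd)
  · intro H i hmem hmod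
    rw [PySem.List.mem_pyRange_one] at hmem
    rw [PySem.Int.mod_eq_zero_iff_dvd] at hmod
    lift i to Nat using (by omega : (0 : Int) ≤ i)
    exact H i (by exact_mod_cast hmem.1)
      (Nat.le_sqrt.mp (Nat.lt_succ_iff.mp (by exact_mod_cast hmem.2)))
      (by exact_mod_cast hmod)

lemma length_markMult (N i : Nat) (hi : 2 ≤ i) (m : Nat) (s : List Bool) :
    (markMult N i hi m s).length = s.length := by
  fun_induction markMult with
  | case1 m s h ih => simpa using ih
  | case2 => rfl

lemma markMult_getD (N i : Nat) (hi : 2 ≤ i) (m : Nat) (s : List Bool) :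
    ∀ k, k < s.length →
      (markMult N i hi m s).getD k false =
        if m ≤ k ∧ k ≤ N ∧ i ∣ (k - m) then false else s.getD k false := by
  fun_induction markMult with
  | case1 m s h ih =>
    intro k hk
    rw [ih k (by simpa using hk)]
    by_cases hkm : k = m
    · subst hkm
      rw [if_neg (by omega), if_pos ⟨le_refl k, h, by simp⟩]
      simp [List.getD, hk]
    · have hset : (s.set m false).getD k false = s.getD k false := by
        simp [List.getD, List.getElem?_set_ne (fun he => hkm he.symm)]
      rw [hset]
      by_cases hc : m + i ≤ k ∧ k ≤ N ∧ i ∣ (k - (m + i))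
      · rw [if_pos hc, if_pos ?_]
        refine ⟨by omega, hc.2.1, ?_⟩
        have : k - m = (k - (m + i)) + i := by omega
        rw [this]; exact Nat.dvd_add hc.2.2 (dvd_refl i)
      · rw [if_neg hc, if_neg ?_]
        rintro ⟨h1, h2, h3⟩
        have hmk : m < k := lt_of_le_of_ne h1 (fun he => hkm he.symm)
        have hik : i ≤ k - m := Nat.le_of_dvd (by omega) h3
        exact hc ⟨by omega, h2, by
          have : k - (m + i) = (k - m) - i := by omega
          rw [this]; exact Nat.dvd_sub h3 (dvd_refl i)⟩
  | case2 m s h =>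
    intro k hk
    rw [if_neg (by omega)]

lemma sieveLoop_inv (N i : Nat) (hi : 2 ≤ i) (s : List Bool) :
    s.length = N + 1 →
    (∀ k, k ≤ N → (s.getD k false = false ↔ Marked i k)) →
    ∀ k, k ≤ N →
      ((sieveLoop N i hi s).getD k false = false ↔ (k < 2 ∨ ¬ NoSmallDiv k)) := by
  fun_induction sieveLoop with
  | case1 i hi s h ih =>
    intro hlen hinv
    have hiN : i ≤ N := le_trans (Nat.le_mul_of_pos_left i (by omega)) h
    rw [← dite_eq_ite]
    refine ih ?_ ?_
    · split <;> simp [length_markMult, hlen]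
    · intro k hk
      by_cases hsi : s.getD i false = true
      · rw [dif_pos hsi, markMult_getD N i hi (i * i) s k (by omega)]
        by_cases hc : i * i ≤ k ∧ k ≤ N ∧ i ∣ (k - i * i)
        · rw [if_pos hc]
          have hik : i ∣ k := by
            have h2 := Nat.dvd_add hc.2.2 (dvd_mul_left i i)
            rwa [Nat.sub_add_cancel hc.1] at h2
          simp only [true_iff]
          exact Or.inr ⟨i, hi, by omega, hc.1, hik⟩
        · rw [if_neg hc, hinv k hk]
          constructor
          · rintro (h2 | ⟨d, hd2, hdi, hdd, hdc⟩)
            · exact Or.inl h2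
            · exact Or.inr ⟨d, hd2, by omega, hdd, hdc⟩
          · rintro (h2 | ⟨d, hd2, hdi, hdd, hdc⟩)
            · exact Or.inl h2
            · by_cases hdi' : d < i
              · exact Or.inr ⟨d, hd2, hdi', hdd, hdc⟩
              · have hde : d = i := by omega
                subst hde
                exact absurd ⟨hdd, hk, Nat.dvd_sub hdc (dvd_mul_left d d)⟩ hc
      · rw [dif_neg hsi]
        have hmi : Marked i i := (hinv i hiN).mp (by revert hsi; cases s.getD i false <;> simp)
        rw [hinv k hk]
        constructor
        · rintro (h2 | ⟨d, hd2, hdi, hdd, hdc⟩)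
          · exact Or.inl h2
          · exact Or.inr ⟨d, hd2, by omega, hdd, hdc⟩
        · rintro (h2 | ⟨d, hd2, hdi, hdd, hdc⟩)
          · exact Or.inl h2
          · by_cases hdi' : d < i
            · exact Or.inr ⟨d, hd2, hdi', hdd, hdc⟩
            · have hde : d = i := by omega
              subst hde
              rcases hmi with h2' | ⟨e, he2, hei, hee, hed⟩
              · omega
              · have hdd2 : d ≤ d * d := Nat.le_mul_of_pos_left d (by omega)
                exact Or.inr ⟨e, he2, by omega, by omega, dvd_trans hed hdc⟩
  | case2 i hi s h =>
    intro hlen hinv k hk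
    rw [hinv k hk]
    unfold Marked NoSmallDiv
    constructor
    · rintro (h2 | ⟨d, hd2, _, hdd, hdc⟩)
      · exact Or.inl h2
      · exact Or.inr (by push Not; exact ⟨d, hd2, hdd, hdc⟩)
    · rintro (h2 | hns)
      · exact Or.inl h2
      · push Not at hns
        obtain ⟨d, hd2, hdd, hdc⟩ := hns
        have hdi : d < i := by
          by_contra hge
          push Not at hge
          have := Nat.mul_le_mul hge hge
          omega
        exact Or.inr ⟨d, hd2, hdi, hdd, hdc⟩

lemma sieve_getD (N : Nat) (hN : 2 ≤ N) (k : Nat) (hk2 : 2 ≤ k) (hkN : k ≤ N) :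
    (sieveLoop N 2 (by omega)
        (((List.replicate (N + 1) true).set 0 false).set 1 false)).getD k false =
      kt_snt (k : Int) := by
  have hinit : ∀ k', k' ≤ N →
      ((((List.replicate (N + 1) true).set 0 false).set 1 false).getD k' false = false ↔
        Marked 2 k') := by
    intro k' hk'
    match k' with
    | 0 => simp [List.getD, Marked]
    | 1 =>
      have h0 : 0 < N := by omega
      simp [List.getD, Marked, h0]
    | (j + 2) =>
      have hlt : j + 2 < N + 1 := by omega
      simp only [List.getD, List.getElem?_set, List.getElem?_replicate, hlt, if_pos, Marked]
      constructor
      · intro hfa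
        simp at hfa
      · rintro (h2 | ⟨d, hd2, hdi, _, _⟩) <;> simp <;> omega
  have H := sieveLoop_inv N 2 (by omega) _ (by simp) hinit k hkN
  have HK := kt_snt_iff k hk2
  cases hA : kt_snt (k : Int) with
  | true =>
    have hno : NoSmallDiv k := HK.mp hA
    cases hs : (sieveLoop N 2 (by omega)
        (((List.replicate (N + 1) true).set 0 false).set 1 false)).getD k false with
    | true => rfl
    | false =>
      rcases H.mp hs with h2 | h2
      · omega
      · exact absurd hno h2
  | false =>
    have hno : ¬ NoSmallDiv k := fun hn => by simp [HK.mpr hn] at hA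
    cases hs : (sieveLoop N 2 (by omega)
        (((List.replicate (N + 1) true).set 0 false).set 1 false)).getD k false with
    | true =>
      rw [H.mpr (Or.inr hno)] at hs
      exact (Bool.false_ne_true hs).elim
    | false => rfl

theorem phan_tich_spec : Claim_equal_phan_tich := by
  intro n _
  unfold Spec_phan_tich phan_tich phan_tich_alt
  have hfd : PySem.Int.floordiv n 2 = n / 2 := PySem.Int.floordiv_eq_ediv_of_pos (by omega)
  by_cases hn : n < 4
  · rw [if_pos hn, PySem.List.pyRange_one_eq_nil (by omega)]
    rfl
  · rw [if_neg hn]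
    congr 1
    refine List.foldl_ext _ _ _ ?_
    intro st a ha
    rw [PySem.List.mem_pyRange_one, hfd] at ha
    have h2a : 2 ≤ a := ha.1
    have h2an : 2 * a ≤ n := by omega
    have e1 : (sieveLoop n.toNat 2 (by omega)
        (((List.replicate (n.toNat + 1) true).set 0 false).set 1 false)).getD a.toNat false
        = kt_snt a := by
      rw [sieve_getD n.toNat (by omega) a.toNat (by omega) (by omega)]
      congr 1
      exact Int.toNat_of_nonneg (by omega)
    have e2 : (sieveLoop n.toNat 2 (by omega)
        (((List.replicate (n.toNat + 1) true).set 0 false).set 1 false)).getD (n - a).toNat false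
        = kt_snt (n - a) := by
      rw [sieve_getD n.toNat (by omega) (n - a).toNat (by omega) (by omega)]
      congr 1
      exact Int.toNat_of_nonneg (by omega)
    have habs : |n - a - a| = n - a - a := abs_of_nonneg (by omega)
    simp only [e1, e2, habs]
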